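-- pv_equiv track=rewrite | github.com/sowmyasunkara-knsass/codemind-python | MaxContainers.py | maxContainers
-- ===== SOURCE A (Python) =====
-- def maxContainers(n: int, w: int, maxWeight: int) -> int:
--     a = n*n
--     if a*w<=maxWeight:
--         return a
--     else:
--         for i in range(a,-1,-1):
--             if i*w<=maxWeight:
--                 return i
-- ===== SOURCE B (Python) =====
-- def maxContainers(n: int, w: int, maxWeight: int) -> int:
--     a = n * n
--     if a * w <= maxWeight:
--         return a
--     return maxWeight // w
-- ===== Notes on version B (the rewrite author's own statement) =====
-- stated objective: faster
-- what changed: replaces the O(n^2) downward linear scan for the largest i with i*w<=maxWeight by the closed form maxWeight//w (the scan is only reached when w>0, where floor division gives its answer directly)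
-- outside the precondition, e.g. on maxContainers(1, 2, -5): A returns None, B returns -3
import Mathlib
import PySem

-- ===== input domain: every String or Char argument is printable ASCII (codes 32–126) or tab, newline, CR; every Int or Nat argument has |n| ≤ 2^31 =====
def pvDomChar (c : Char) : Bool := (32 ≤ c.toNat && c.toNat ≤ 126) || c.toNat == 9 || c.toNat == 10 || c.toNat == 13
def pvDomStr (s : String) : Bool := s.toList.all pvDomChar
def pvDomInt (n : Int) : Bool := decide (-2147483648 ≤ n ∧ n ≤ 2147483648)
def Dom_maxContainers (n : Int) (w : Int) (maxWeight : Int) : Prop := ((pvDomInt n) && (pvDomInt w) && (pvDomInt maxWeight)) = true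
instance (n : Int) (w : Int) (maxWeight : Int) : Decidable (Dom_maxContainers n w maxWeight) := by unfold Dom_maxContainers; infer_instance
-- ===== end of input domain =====

-- B replaces A's O(n^2) downward scan by the closed form maxWeight // w (objective: faster, asymptotic).


-- ===== PORT A =====
-- literal port of A: a = n*n; if a*w<=maxWeight return a; else scan range(a,-1,-1)
-- for the first i with i*w<=maxWeight. When the scan finds nothing Python returns
-- None (not an int); those inputs are excluded by Pre_, the port yields 0 there.
def maxContainers (n : Int) (w : Int) (maxWeight : Int) : Int :=
  let a := n * n
  if a * w ≤ maxWeight then a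
  else ((PySem.List.pyRange a (-1) (-1)).find? (fun i => decide (i * w ≤ maxWeight))).getD 0

-- ===== PORT B =====
def maxContainers_alt (n : Int) (w : Int) (maxWeight : Int) : Int :=
  let a := n * n
  if a * w ≤ maxWeight then a
  else PySem.Int.floordiv maxWeight w

-- ===== PRECONDITION & SPEC =====
-- Pre_ excludes exactly the inputs (n*n*w > maxWeight and maxWeight < 0) on which
-- A's scan finds no i and Python falls off the function, returning None (not an int);
-- B returns maxWeight//w (or raises for w=0) there.
def Pre_maxContainers (n : Int) (w : Int) (maxWeight : Int) : Prop :=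
  n * n * w ≤ maxWeight ∨ 0 ≤ maxWeight
instance (n : Int) (w : Int) (maxWeight : Int) : Decidable (Pre_maxContainers n w maxWeight) := by unfold Pre_maxContainers; infer_instance
def pvWitness_maxContainers : Int × Int × Int := (3, 4, 20)

def Spec_maxContainers (n : Int) (w : Int) (maxWeight : Int) (out : Int) : Prop := out = maxContainers_alt n w maxWeight
instance (n : Int) (w : Int) (maxWeight : Int) (out : Int) : Decidable (Spec_maxContainers n w maxWeight out) := by unfold Spec_maxContainers; infer_instance

-- ===== CLAIM (what is proved, stated in full; the proofs are below) =====
def Claim_equal_maxContainers : Prop := ∀ (n : Int) (w : Int) (maxWeight : Int), Dom_maxContainers n w maxWeight → Pre_maxContainers n w maxWeight → Spec_maxContainers n w maxWeight (maxContainers n w maxWeight)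

-- ===== LEMMAS AND PROOFS =====

-- First element ≤ q of the countdown list a, a-1, …, 0 is q itself (0 ≤ q ≤ a).
lemma find_desc_le (q : Int) (hq : 0 ≤ q) : ∀ (a : Int), q ≤ a →
    ((PySem.List.pyRange a (-1) (-1)).find? (fun i => decide (i ≤ q))).getD 0 = q := by
  intro a ha
  induction h : (a - q).toNat generalizing a with
  | zero =>
    have : a = q := by omega
    subst this
    rw [PySem.List.pyRange_neg_one_cons (by omega)]
    simp [List.find?]
  | succ k ih =>
    rw [PySem.List.pyRange_neg_one_cons (by omega)]
    have hfalse : (decide (a ≤ q)) = false := by simp; omega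
    simp only [List.find?, hfalse]
    exact ih (a - 1) (by omega) (by omega)

theorem maxContainers_spec : Claim_equal_maxContainers := by
  intro n w maxWeight _hdom hpre
  unfold Spec_maxContainers maxContainers maxContainers_alt
  by_cases hif : n * n * w ≤ maxWeight
  · simp [hif]
  · simp only [hif, if_false]
    have hm : 0 ≤ maxWeight := by
      rcases hpre with h | h
      · exact absurd h hif
      · exact h
    have hw : 0 < w := by
      by_contra hw
      push_neg at hw
      exact hif (le_trans (by nlinarith [sq_nonneg n]) hm)
    have hfd : PySem.Int.floordiv maxWeight w = maxWeight / w :=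
      PySem.Int.floordiv_eq_ediv_of_pos hw
    set q := maxWeight / w with hqdef
    have hq0 : 0 ≤ q := Int.ediv_nonneg hm (le_of_lt hw)
    have hiff : ∀ i : Int, (i * w ≤ maxWeight) ↔ (i ≤ q) := by
      intro i
      rw [hqdef, Int.le_ediv_iff_mul_le hw]
    have hqa : q ≤ n * n := by
      by_contra hqa
      push_neg at hqa
      exact hif ((hiff (n * n)).mpr (le_of_lt hqa))
    have hpred : (fun i => decide (i * w ≤ maxWeight)) = (fun i => decide (i ≤ q)) := by
      funext i
      simp [hiff i]
    rw [hpred, find_desc_le q hq0 (n * n) hqa, hfd]
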